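-- pv_equiv track=rewrite | github.com/uzairgheewala/HDLOpt | hdlopt/scripts/parsing/native.py | _parse_port_lines
-- ===== SOURCE A (Python) =====
-- from typing import List, Dict, Optional
--
-- def _parse_port_lines(port_text: str) -> List[str]:
--     """Split port text into individual port declarations, handling comments and multi-line declarations.
--
--     Args:
--         port_text: Raw port text from module definition
--
--     Returns:
--         List of cleaned port declarations
--     """
--     ports = []
--     current_port = []
--     lines = port_text.split('\n')
--     i = 0
--
--     while i < len(lines):
--         line = lines[i].strip()
--
--         # Skip empty lines and comment-only lines
--         if not line or line.startswith('//'):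
--             i += 1
--             continue
--
--         # Check if this is a port declaration line (starts with input/output)
--         if line.startswith('input') or line.startswith('output'):
--             # Start collecting a new port declaration
--             port_parts = []
--
--             # Keep collecting until we find a comma or semicolon
--             while i < len(lines):
--                 line = lines[i].strip()
--
--                 # Skip comment-only lines in the middle of a declaration
--                 if not line or line.startswith('//'):
--                     i += 1
--                     continue
--
--                 # Extract content before any comment
--                 if '//' in line:
--                     line, comment = line.split('//', 1)
--                     line = line.strip()
--
--                 port_parts.append(line)
--
--                 # Check if this port declaration is complete
--                 if line.endswith(',') or line.endswith(';'):
--                     break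
--
--                 i += 1
--
--             # Join the parts and clean up
--             port_decl = ' '.join(port_parts).rstrip(',;')
--             if port_decl:
--                 ports.append(port_decl)
--
--         i += 1
--
--     return ports
-- ===== SOURCE B (Python) =====
-- from typing import List
--
-- def _parse_port_lines(port_text: str) -> List[str]:
--     # Pass 1: strip every line, drop empty and comment-only lines.
--     stripped = [ln.strip() for ln in port_text.split('\n')]
--     lines = [ln for ln in stripped if ln and not ln.startswith('//')]
--
--     # Pass 2: one stateful scan; parts is None when not inside a declaration.
--     ports = []
--     parts = None
--     for line in lines:
--         if parts is None:
--             if not (line.startswith('input') or line.startswith('output')):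
--                 continue
--             parts = []
--         if '//' in line:
--             line = line.split('//', 1)[0].strip()
--         parts.append(line)
--         if line.endswith(',') or line.endswith(';'):
--             decl = ' '.join(parts).rstrip(',;')
--             if decl:
--                 ports.append(decl)
--             parts = None
--     if parts is not None:
--         decl = ' '.join(parts).rstrip(',;')
--         if decl:
--             ports.append(decl)
--     return ports
-- ===== Notes on version B (the rewrite author's own statement) =====
-- stated objective: alternative
-- what changed: A's single index-driven while loop with a nested collection while loop is replaced by a two-pass pipeline: one pass that strips lines and filters out empty and comment-only lines, then one stateful fold over the cleaned lines with an optional parts accumulator that starts on an input/output keyword, closes when a line ends in a comma or semicolon, and flushes any open group at end of input.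
import Mathlib
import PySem

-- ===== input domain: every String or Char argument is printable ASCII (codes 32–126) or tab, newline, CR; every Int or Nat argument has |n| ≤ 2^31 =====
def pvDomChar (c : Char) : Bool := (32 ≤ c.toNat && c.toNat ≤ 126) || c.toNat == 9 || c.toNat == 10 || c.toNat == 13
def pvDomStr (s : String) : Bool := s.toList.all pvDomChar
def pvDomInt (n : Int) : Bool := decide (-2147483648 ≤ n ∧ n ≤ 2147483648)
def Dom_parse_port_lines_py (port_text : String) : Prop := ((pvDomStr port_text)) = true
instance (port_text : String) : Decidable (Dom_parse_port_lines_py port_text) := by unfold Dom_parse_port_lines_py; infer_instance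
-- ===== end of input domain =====

-- B replaces A's nested index-driven while loops by a strip/filter pass followed by one
-- stateful fold over the cleaned lines (same cost; objective: alternative decomposition).


-- ===== PORT A =====

-- hand-port of s.rstrip(',;') (exact: drops trailing ',' and ';' characters)
def pvRstripCS_A (s : String) : String :=
  String.ofList ((s.toList.reverse.dropWhile (fun c => c == ',' || c == ';')).reverse)

-- comment handling: `if '//' in line: line, _ = line.split('//', 1); line = line.strip()`
def pvCleanLineA (line : String) : String :=
  if PySem.Str.isIn "//" line
    then PySem.Str.strip (((PySem.Str.splitMax? line "//" 1).getD []).getD 0 "")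
    else line

-- A's inner `while i < len(lines)` collection loop: consumes lines, returns the collected
-- port_parts together with the lines remaining AFTER the line that ended with ','/';'
-- (Python leaves i at that line; the outer `i += 1` then skips it), or ([], ) at EOF.
def pvInnerA (ls : List String) (parts : List String) : List String × List String :=
  match ls with
  | [] => (parts, [])
  | l :: ls =>
    let line := PySem.Str.strip l
    if line == "" || PySem.Str.startswith line "//" then pvInnerA ls parts
    else
      let line := pvCleanLineA line
      let parts' := parts ++ [line]
      if PySem.Str.endswith line "," || PySem.Str.endswith line ";" then (parts', ls)
      else pvInnerA ls parts'

theorem pvInnerA_len (ls : List String) (parts : List String) :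
    (pvInnerA ls parts).2.length ≤ ls.length := by
  induction ls generalizing parts with
  | nil => simp [pvInnerA]
  | cons l ls ih =>
    simp only [pvInnerA]
    repeat' split
    all_goals
      first
        | exact Nat.le_succ _
        | exact Nat.le_succ_of_le (ih _)

theorem pvInnerA_cons_len (l : String) (ls : List String) (parts : List String) :
    (pvInnerA (l :: ls) parts).2.length ≤ ls.length := by
  simp only [pvInnerA]
  repeat' split
  all_goals
    first
      | exact Nat.le_refl _
      | exact pvInnerA_len ls _

-- A's outer `while i < len(lines)` loop over the remaining lines.
def pvOuterA (ls : List String) (ports : List String) : List String :=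
  match ls with
  | [] => ports
  | l :: ls' =>
    let line := PySem.Str.strip l
    if line == "" || PySem.Str.startswith line "//" then pvOuterA ls' ports
    else if PySem.Str.startswith line "input" || PySem.Str.startswith line "output" then
      let r := pvInnerA (l :: ls') []
      let decl := pvRstripCS_A (PySem.Str.join " " r.1)
      pvOuterA r.2 (if decl == "" then ports else ports ++ [decl])
    else pvOuterA ls' ports
  termination_by ls.length
  decreasing_by
  · simp
  · exact lt_of_le_of_lt (pvInnerA_cons_len l ls' []) (by simp)
  · simp

def parse_port_lines_py (port_text : String) : List String :=
  pvOuterA ((PySem.Str.split? port_text "\n").getD []) []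

-- ===== PORT B =====

-- hand-port of s.rstrip(',;') (exact: drops trailing ',' and ';' characters)
def pvRstripCS_B (s : String) : String :=
  String.ofList ((s.toList.reverse.dropWhile (fun c => c == ',' || c == ';')).reverse)

-- comment handling, as in A's source: keep the stripped part left of an inline '//'
def pvCleanLineB (line : String) : String :=
  if PySem.Str.isIn "//" line
    then PySem.Str.strip (((PySem.Str.splitMax? line "//" 1).getD []).getD 0 "")
    else line

-- close a group: ' '.join(parts).rstrip(',;'), appended if non-empty
def pvCloseB (parts : List String) (ports : List String) : List String :=
  let decl := pvRstripCS_B (PySem.Str.join " " parts)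
  if decl == "" then ports else ports ++ [decl]

-- one step of B's stateful scan; state = (optional parts accumulator, ports so far)
def pvStepB (st : Option (List String) × List String) (line : String) :
    Option (List String) × List String :=
  let go : List String → Option (List String) × List String := fun parts =>
    let line := pvCleanLineB line
    let parts := parts ++ [line]
    if PySem.Str.endswith line "," || PySem.Str.endswith line ";" then
      (none, pvCloseB parts st.2)
    else (some parts, st.2)
  match st.1 with
  | none =>
    if !(PySem.Str.startswith line "input" || PySem.Str.startswith line "output") then st
    else go []
  | some parts => go parts

-- B's final flush of an unterminated group
def pvFinB (st : Option (List String) × List String) : List String :=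
  match st.1 with
  | none => st.2
  | some parts => pvCloseB parts st.2

def parse_port_lines_py_alt (port_text : String) : List String :=
  let stripped := ((PySem.Str.split? port_text "\n").getD []).map PySem.Str.strip
  let lines := stripped.filter (fun ln => !(ln == "" || PySem.Str.startswith ln "//"))
  pvFinB (lines.foldl pvStepB (none, []))

-- ===== PRECONDITION & SPEC =====
def Spec_parse_port_lines_py (port_text : String) (out : List String) : Prop := out = parse_port_lines_py_alt port_text
instance (port_text : String) (out : List String) : Decidable (Spec_parse_port_lines_py port_text out) := by unfold Spec_parse_port_lines_py; infer_instance

-- ===== CLAIM (what is proved, stated in full; the proofs are below) =====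
def Claim_equal_parse_port_lines_py : Prop := ∀ (port_text : String), Dom_parse_port_lines_py port_text → Spec_parse_port_lines_py port_text (parse_port_lines_py port_text)

-- ===== LEMMAS AND PROOFS =====

def pvCleanB (ls : List String) : List String :=
  (ls.map PySem.Str.strip).filter (fun ln => !(ln == "" || PySem.Str.startswith ln "//"))

theorem pvCleanB_cons (l : String) (ls : List String) :
    pvCleanB (l :: ls)
      = if (PySem.Str.strip l == "" || PySem.Str.startswith (PySem.Str.strip l) "//") = true
        then pvCleanB ls else PySem.Str.strip l :: pvCleanB ls := by
  cases hx : (PySem.Str.strip l == "" || PySem.Str.startswith (PySem.Str.strip l) "//") with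
  | true =>
    simp only [pvCleanB, List.map_cons, List.filter_cons, hx, Bool.not_true,
      Bool.false_eq_true, if_true, if_false]
  | false =>
    simp only [pvCleanB, List.map_cons, List.filter_cons, hx, Bool.not_false,
      Bool.false_eq_true, if_true, if_false]

-- The joint invariant: P ls (A's outer loop = B's fold from a non-collecting state) and
-- Q ls (from a collecting state, B's fold = A's inner loop followed by A's outer loop).
theorem pvMain (ls : List String) :
    (∀ ports, pvOuterA ls ports = pvFinB ((pvCleanB ls).foldl pvStepB (none, ports)))
    ∧ (∀ parts ports,
        pvFinB ((pvCleanB ls).foldl pvStepB (some parts, ports))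
          = pvOuterA (pvInnerA ls parts).2 (pvCloseB (pvInnerA ls parts).1 ports)) := by
  induction ls with
  | nil =>
    refine ⟨fun ports => ?_, fun parts ports => ?_⟩
    · rw [pvOuterA]; rfl
    · simp only [pvInnerA]; rw [pvOuterA]; rfl
  | cons l ls ih =>
    obtain ⟨ihP, ihQ⟩ := ih
    have hAB : pvCleanLineB = pvCleanLineA := rfl
    have hClose : ∀ (parts ports : List String),
        (if pvRstripCS_A (PySem.Str.join " " parts) == "" then ports
         else ports ++ [pvRstripCS_A (PySem.Str.join " " parts)]) = pvCloseB parts ports :=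
      fun _ _ => rfl
    cases hs : (PySem.Str.strip l == "" || PySem.Str.startswith (PySem.Str.strip l) "//") with
    | true =>
      -- skipped line: both sides drop it
      refine ⟨fun ports => ?_, fun parts ports => ?_⟩
      · rw [pvOuterA, pvCleanB_cons]
        simp only [hs, if_true]
        exact ihP ports
      · rw [pvCleanB_cons]
        simp only [pvInnerA, hs, if_true]
        exact ihQ parts ports
    | false =>
      have hcons : pvCleanB (l :: ls) = PySem.Str.strip l :: pvCleanB ls := by
        rw [pvCleanB_cons]
        simp only [hs, Bool.false_eq_true, if_false]
      refine ⟨fun ports => ?_, fun parts ports => ?_⟩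
      · -- P: from the non-collecting state
        rw [pvOuterA, hcons]
        simp only [hs, Bool.false_eq_true, if_false, List.foldl_cons, pvStepB, hAB]
        cases hst : (PySem.Str.startswith (PySem.Str.strip l) "input"
            || PySem.Str.startswith (PySem.Str.strip l) "output") with
        | true =>
          simp only [pvInnerA, hs, Bool.not_true, Bool.false_eq_true, if_false,
            if_true, List.nil_append]
          cases hE : (PySem.Str.endswith (pvCleanLineA (PySem.Str.strip l)) ","
              || PySem.Str.endswith (pvCleanLineA (PySem.Str.strip l)) ";") with
          | true =>
            simp only [if_true, hClose]
            exact ihP _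
          | false =>
            simp only [Bool.false_eq_true, if_false, hClose]
            exact (ihQ _ _).symm
        | false =>
          simp only [Bool.not_false, Bool.false_eq_true, if_false, if_true]
          exact ihP ports
      · -- Q: from the collecting state
        rw [hcons]
        simp only [hs, Bool.false_eq_true, if_false, List.foldl_cons, pvStepB, hAB, pvInnerA]
        cases hE : (PySem.Str.endswith (pvCleanLineA (PySem.Str.strip l)) ","
            || PySem.Str.endswith (pvCleanLineA (PySem.Str.strip l)) ";") with
        | true =>
          simp only [if_true]
          exact (ihP _).symm
        | false =>
          simp only [Bool.false_eq_true, if_false]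
          exact ihQ _ _

-- ===== VERDICT (by name: the statement is the Claim_ definition above) =====
theorem parse_port_lines_py_spec : Claim_equal_parse_port_lines_py := by
  intro port_text _
  unfold Spec_parse_port_lines_py parse_port_lines_py parse_port_lines_py_alt
  exact (pvMain _).1 []
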